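-- pv_equiv track=rewrite | github.com/Rawan10101/Inventory_Management | src/services/fresh_flow_ultimate_solution.py | _estimate_shelf_life
-- ===== SOURCE A (Python) =====
-- def _estimate_shelf_life(row) -> int:
--     """Intelligently estimate shelf life based on item characteristics"""
--     item_type = str(row.get('type', '')).lower()
--     title = str(row.get('title', '')).lower()
--
--     # Perishable items (dairy, produce, prepared foods)
--     if any(word in title for word in ['milk', 'cream', 'yogurt', 'cheese', 'salad',
--                                       'sandwich', 'fresh', 'juice']):
--         return 3
--
--     # Short shelf life (baked goods, prepared items)
--     if any(word in title for word in ['bread', 'pastry', 'cake', 'muffin',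
--                                       'croissant', 'coffee', 'latte']):
--         return 7
--
--     # Medium shelf life (packaged goods)
--     if any(word in item_type for word in ['packaged', 'canned', 'bottled']):
--         return 30
--
--     # Long shelf life (dry goods, frozen)
--     if any(word in item_type for word in ['frozen', 'dry', 'grain', 'pasta']):
--         return 90
--
--     # Default
--     return 14
-- ===== SOURCE B (Python) =====
-- _KEYWORD_DAYS = [
--     ('milk', 'title', 3), ('cream', 'title', 3), ('yogurt', 'title', 3),
--     ('cheese', 'title', 3), ('salad', 'title', 3), ('sandwich', 'title', 3),
--     ('fresh', 'title', 3), ('juice', 'title', 3),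
--     ('bread', 'title', 7), ('pastry', 'title', 7), ('cake', 'title', 7),
--     ('muffin', 'title', 7), ('croissant', 'title', 7), ('coffee', 'title', 7),
--     ('latte', 'title', 7),
--     ('packaged', 'type', 30), ('canned', 'type', 30), ('bottled', 'type', 30),
--     ('frozen', 'type', 90), ('dry', 'type', 90), ('grain', 'type', 90),
--     ('pasta', 'type', 90),
-- ]
--
--
-- def _estimate_shelf_life(row) -> int:
--     """Shelf life = minimum days over ALL matching keywords (the branch
--     priority is exactly the ascending day values 3 < 7 < 30 < 90); 14 if
--     nothing matches."""
--     text = {'type': str(row.get('type', '')).lower(),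
--             'title': str(row.get('title', '')).lower()}
--     matched = [days for word, field, days in _KEYWORD_DAYS if word in text[field]]
--     return min(matched, default=14)
-- ===== Notes on version B (the rewrite author's own statement) =====
-- stated objective: alternative
-- what changed: A picks the first matching branch of an ordered if-chain; B computes the set of ALL matching (keyword, field, days) entries in one comprehension over a flat table and returns the minimum days with default 14, relying on the fact that A's branch priority equals the ascending order of the day values 3 < 7 < 30 < 90.
import Mathlib
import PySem

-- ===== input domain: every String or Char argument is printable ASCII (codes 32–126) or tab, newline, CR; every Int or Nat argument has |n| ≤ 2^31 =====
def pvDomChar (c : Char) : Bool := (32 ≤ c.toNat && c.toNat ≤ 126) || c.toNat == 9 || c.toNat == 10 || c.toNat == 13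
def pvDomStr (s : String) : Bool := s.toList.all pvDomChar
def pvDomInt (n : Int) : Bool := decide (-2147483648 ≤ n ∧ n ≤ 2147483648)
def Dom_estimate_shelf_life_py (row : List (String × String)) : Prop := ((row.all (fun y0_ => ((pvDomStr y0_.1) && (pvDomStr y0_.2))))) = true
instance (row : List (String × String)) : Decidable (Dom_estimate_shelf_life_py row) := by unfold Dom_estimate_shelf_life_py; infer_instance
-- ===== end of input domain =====

-- B replaces A's ordered first-match if-chain by collecting ALL matching (keyword, field, days)
-- entries of a flat table and taking the minimum days (default 14): correct because A's branch
-- priority equals the ascending day values 3 < 7 < 30 < 90 (objective: alternative).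

-- ===== PORT A =====
def estimate_shelf_life_py (row : List (String × String)) : Int :=
  let item_type := PySem.Str.lower ((PySem.Dict.mk row).getD "type" "")
  let title := PySem.Str.lower ((PySem.Dict.mk row).getD "title" "")
  if ["milk", "cream", "yogurt", "cheese", "salad",
      "sandwich", "fresh", "juice"].any (fun word => PySem.Str.isIn word title) then 3
  else if ["bread", "pastry", "cake", "muffin",
           "croissant", "coffee", "latte"].any (fun word => PySem.Str.isIn word title) then 7
  else if ["packaged", "canned", "bottled"].any (fun word => PySem.Str.isIn word item_type) then 30
  else if ["frozen", "dry", "grain", "pasta"].any (fun word => PySem.Str.isIn word item_type) then 90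
  else 14

-- ===== PORT B =====
def shelfKeywordDays : List (String × String × Int) :=
  [("milk", "title", 3), ("cream", "title", 3), ("yogurt", "title", 3),
   ("cheese", "title", 3), ("salad", "title", 3), ("sandwich", "title", 3),
   ("fresh", "title", 3), ("juice", "title", 3),
   ("bread", "title", 7), ("pastry", "title", 7), ("cake", "title", 7),
   ("muffin", "title", 7), ("croissant", "title", 7), ("coffee", "title", 7),
   ("latte", "title", 7),
   ("packaged", "type", 30), ("canned", "type", 30), ("bottled", "type", 30),
   ("frozen", "type", 90), ("dry", "type", 90), ("grain", "type", 90),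
   ("pasta", "type", 90)]

def estimate_shelf_life_py_alt (row : List (String × String)) : Int :=
  let text : PySem.Dict String String :=
    PySem.Dict.ofList [("type", PySem.Str.lower ((PySem.Dict.mk row).getD "type" "")),
                       ("title", PySem.Str.lower ((PySem.Dict.mk row).getD "title" ""))]
  let matched :=
    (shelfKeywordDays.filter
        (fun wfd => PySem.Str.isIn wfd.1 (text.getD wfd.2.1 ""))).map (fun wfd => wfd.2.2)
  (PySem.List.min? matched (fun x => x)).getD 14

-- ===== PRECONDITION & SPEC =====
def Spec_estimate_shelf_life_py (row : List (String × String)) (out : Int) : Prop := out = estimate_shelf_life_py_alt row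
instance (row : List (String × String)) (out : Int) : Decidable (Spec_estimate_shelf_life_py row out) := by unfold Spec_estimate_shelf_life_py; infer_instance

-- ===== CLAIM =====
def Claim_equal_estimate_shelf_life_py : Prop := ∀ (row : List (String × String)), Dom_estimate_shelf_life_py row → Spec_estimate_shelf_life_py row (estimate_shelf_life_py row)

-- ===== LEMMAS AND PROOFS =====

theorem foldl_min_eq_self (a : Int) (l : List Int) (h : ∀ x ∈ l, a ≤ x) : l.foldl min a = a := by
  induction l generalizing a with
  | nil => rfl
  | cons x t ih =>
      have hx : min a x = a := min_eq_left (h x (by simp))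
      simp only [List.foldl_cons, hx]
      exact ih a (fun y hy => h y (by simp [hy]))

theorem minD_rep_append (n : Nat) (d : Int) (rest : List Int) (dflt : Int)
    (h : ∀ x ∈ rest, d ≤ x) :
    ((PySem.List.min? (List.replicate n d ++ rest) (fun x => x)).getD dflt)
      = if n = 0 then ((PySem.List.min? rest (fun x => x)).getD dflt) else d := by
  cases n with
  | zero => simp
  | succ m =>
      have : List.replicate (m + 1) d ++ rest = d :: (List.replicate m d ++ rest) := by
        simp [List.replicate_succ]
      rw [this, PySem.List.min?_id_cons]
      have hall : ∀ x ∈ List.replicate m d ++ rest, d ≤ x := by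
        intro x hx
        rcases List.mem_append.1 hx with hx | hx
        · simp [List.eq_of_mem_replicate hx]
        · exact h x hx
      simp [foldl_min_eq_self d _ hall]

-- a homogeneous block of the table, filtered, maps to a replicate of its days value
theorem block_filter_map (ws : List String) (f : String) (d : Int) (p : String → String → Bool) :
    (((ws.map (fun w => (w, f, d))).filter
        (fun wfd => p wfd.1 wfd.2.1)).map (fun wfd : String × String × Int => wfd.2.2))
      = List.replicate ((ws.filter (fun w => p w f)).length) d := by
  induction ws with
  | nil => rfl
  | cons w t ih =>
      by_cases hw : p w f = true
      · simp [hw, List.replicate_succ, ih]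
      · simp [hw, ih]

theorem any_iff_filter_len (l : List String) (p : String → Bool) :
    l.any p = true ↔ (l.filter p).length ≠ 0 := by
  simp [List.any_eq_true, List.length_eq_zero_iff, List.filter_eq_nil_iff]

-- the core equality, abstracted over the two lowered strings
theorem core (t y : String) :
    (if ["milk", "cream", "yogurt", "cheese", "salad",
         "sandwich", "fresh", "juice"].any (fun word => PySem.Str.isIn word t) then (3 : Int)
     else if ["bread", "pastry", "cake", "muffin",
              "croissant", "coffee", "latte"].any (fun word => PySem.Str.isIn word t) then 7
     else if ["packaged", "canned", "bottled"].any (fun word => PySem.Str.isIn word y) then 30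
     else if ["frozen", "dry", "grain", "pasta"].any (fun word => PySem.Str.isIn word y) then 90
     else 14)
    = ((PySem.List.min?
          ((shelfKeywordDays.filter
              (fun wfd => PySem.Str.isIn wfd.1
                (if wfd.2.1 = "title" then t else y))).map (fun wfd => wfd.2.2))
          (fun x => x)).getD 14) := by
  have hsplit : shelfKeywordDays =
      (["milk", "cream", "yogurt", "cheese", "salad",
        "sandwich", "fresh", "juice"].map (fun w => (w, "title", (3 : Int))))
      ++ (["bread", "pastry", "cake", "muffin",
           "croissant", "coffee", "latte"].map (fun w => (w, "title", (7 : Int))))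
      ++ (["packaged", "canned", "bottled"].map (fun w => (w, "type", (30 : Int))))
      ++ (["frozen", "dry", "grain", "pasta"].map (fun w => (w, "type", (90 : Int)))) := by
    rfl
  rw [hsplit]
  rw [List.filter_append, List.filter_append, List.filter_append,
      List.map_append, List.map_append, List.map_append]
  rw [block_filter_map _ _ _ (fun w f => PySem.Str.isIn w (if f = "title" then t else y)),
      block_filter_map _ _ _ (fun w f => PySem.Str.isIn w (if f = "title" then t else y)),
      block_filter_map _ _ _ (fun w f => PySem.Str.isIn w (if f = "title" then t else y)),
      block_filter_map _ _ _ (fun w f => PySem.Str.isIn w (if f = "title" then t else y))]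
  simp only [reduceIte, String.reduceEq]
  set n1 := (List.filter (fun w => PySem.Str.isIn w t)
      ["milk", "cream", "yogurt", "cheese", "salad", "sandwich", "fresh", "juice"]).length with hn1
  set n2 := (List.filter (fun w => PySem.Str.isIn w t)
      ["bread", "pastry", "cake", "muffin", "croissant", "coffee", "latte"]).length with hn2
  set n3 := (List.filter (fun w => PySem.Str.isIn w y)
      ["packaged", "canned", "bottled"]).length with hn3
  set n4 := (List.filter (fun w => PySem.Str.isIn w y)
      ["frozen", "dry", "grain", "pasta"]).length with hn4
  rw [List.append_assoc, List.append_assoc]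
  rw [minD_rep_append n1 3 _ 14 (by
        intro x hx
        simp only [List.mem_append, List.mem_replicate] at hx
        omega)]
  rw [minD_rep_append n2 7 _ 14 (by
        intro x hx
        simp only [List.mem_append, List.mem_replicate] at hx
        omega)]
  rw [minD_rep_append n3 30 _ 14 (by
        intro x hx
        simp only [List.mem_replicate] at hx
        omega)]
  have h4 : (List.replicate n4 (90 : Int)) = List.replicate n4 (90 : Int) ++ [] := by simp
  rw [h4, minD_rep_append n4 90 [] 14 (by intro x hx; simp at hx)]
  have hnil : ((PySem.List.min? ([] : List Int) (fun x => x)).getD 14) = 14 := by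
    simp [PySem.List.min?]
  rw [hnil]
  have e1 := any_iff_filter_len
      ["milk", "cream", "yogurt", "cheese", "salad", "sandwich", "fresh", "juice"]
      (fun word => PySem.Str.isIn word t)
  have e2 := any_iff_filter_len
      ["bread", "pastry", "cake", "muffin", "croissant", "coffee", "latte"]
      (fun word => PySem.Str.isIn word t)
  have e3 := any_iff_filter_len ["packaged", "canned", "bottled"]
      (fun word => PySem.Str.isIn word y)
  have e4 := any_iff_filter_len ["frozen", "dry", "grain", "pasta"]
      (fun word => PySem.Str.isIn word y)
  rw [← hn1] at e1
  rw [← hn2] at e2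
  rw [← hn3] at e3
  rw [← hn4] at e4
  by_cases h1 : n1 = 0 <;> by_cases h2 : n2 = 0 <;> by_cases h3 : n3 = 0 <;>
    by_cases h4 : n4 = 0 <;>
    simp only [e1, e2, e3, e4] <;> simp [h1, h2, h3, h4]

-- ===== VERDICT =====
theorem estimate_shelf_life_py_spec : Claim_equal_estimate_shelf_life_py := by
  intro row _
  unfold Spec_estimate_shelf_life_py estimate_shelf_life_py estimate_shelf_life_py_alt
  set t := PySem.Str.lower ((PySem.Dict.mk row).getD "title" "") with ht
  set y := PySem.Str.lower ((PySem.Dict.mk row).getD "type" "") with hy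
  have hfc : List.filter
      (fun wfd : String × String × Int => PySem.Str.isIn wfd.1
        ((PySem.Dict.ofList [("type", y), ("title", t)]).getD wfd.2.1 ""))
      shelfKeywordDays
      = List.filter
      (fun wfd : String × String × Int => PySem.Str.isIn wfd.1
        (if wfd.2.1 = "title" then t else y)) shelfKeywordDays := by
    apply List.filter_congr
    intro x hx
    fin_cases hx <;> rfl
  simp only [hfc]
  exact core t y
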